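-- pv_equiv track=rewrite | github.com/sophiarora/Algorithm_analysis | count_comparisons.py | count_comparisons_final_element
-- ===== SOURCE A (Python) =====
-- def count_comparisons_final_element(array):
--     assert type(array) == list #Array must be a list#
--     m = len(array)
--     if m == 1 or m == 0:
--         return 0
--     else:
--         pivot_point = array[m-1]
--         left = []
--         right = []
--         for i in range(0, m-1):
--             if array[i] > pivot_point:
--                 right += [array[i]]
--             else:
--                 left = [array[i]] + left
--         return (m-1) + count_comparisons_final_element(left) + count_comparisons_final_element(right)
-- ===== SOURCE B (Python) =====
-- def count_comparisons_final_element(array):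
--     assert type(array) == list
--     total = 0
--     stack = [array]
--     while stack:
--         xs = stack.pop()
--         if len(xs) > 1:
--             total += len(xs) - 1
--             pivot = xs[-1]
--             rest = xs[:-1]
--             stack.append([x for x in rest if x > pivot])
--             stack.append([x for x in rest if x <= pivot][::-1])
--     return total
-- ===== Notes on version B (the rewrite author's own statement) =====
-- stated objective: alternative
-- what changed: Replaces A's recursion with an explicit stack/worklist accumulating the count, and replaces A's index-loop prepend/append partition with two filter comprehensions over xs[:-1] (the low side reversed to match A's prepend order).
import Mathlib
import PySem

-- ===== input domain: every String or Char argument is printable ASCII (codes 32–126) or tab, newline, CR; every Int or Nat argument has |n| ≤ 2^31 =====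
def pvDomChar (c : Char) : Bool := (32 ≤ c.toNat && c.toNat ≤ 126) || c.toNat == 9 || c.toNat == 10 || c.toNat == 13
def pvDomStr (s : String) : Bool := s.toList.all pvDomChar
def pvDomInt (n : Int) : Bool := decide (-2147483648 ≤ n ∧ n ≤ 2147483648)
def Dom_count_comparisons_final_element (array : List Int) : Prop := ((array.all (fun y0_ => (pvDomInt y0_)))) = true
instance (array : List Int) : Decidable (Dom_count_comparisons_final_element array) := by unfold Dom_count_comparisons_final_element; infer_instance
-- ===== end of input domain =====

-- B replaces A's recursion by an explicit stack/worklist accumulating the count, and A's index-loop partition by filter comprehensions over xs[:-1] (alternative decomposition).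


-- ===== PORT A =====
-- A's partition loop: left/right built over i in range(0, m-1) from array[i] vs pivot
def pvPartition (array : List Int) (pivot : Int) : List Int × List Int :=
  (PySem.List.pyRange 0 ((array.length : Int) - 1) 1).foldl
    (fun lr i =>
      if PySem.List.pyGetD array i 0 > pivot then (lr.1, lr.2 ++ [PySem.List.pyGetD array i 0])
      else (PySem.List.pyGetD array i 0 :: lr.1, lr.2))
    ([], [])

-- lengths of the two partition halves sum to the number of indices folded (for termination)
theorem pvPartition_foldl_len (l : List Int) (array : List Int) (pivot : Int) :
    ∀ a b : List Int,
      ((l.foldl (fun lr i =>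
        if PySem.List.pyGetD array i 0 > pivot then (lr.1, lr.2 ++ [PySem.List.pyGetD array i 0])
        else (PySem.List.pyGetD array i 0 :: lr.1, lr.2)) (a, b)).1.length
      + (l.foldl (fun lr i =>
        if PySem.List.pyGetD array i 0 > pivot then (lr.1, lr.2 ++ [PySem.List.pyGetD array i 0])
        else (PySem.List.pyGetD array i 0 :: lr.1, lr.2)) (a, b)).2.length)
      = a.length + b.length + l.length := by
  induction l with
  | nil => intro a b; simp
  | cons x xs ih =>
    intro a b
    simp only [List.foldl_cons]
    by_cases h : PySem.List.pyGetD array x 0 > pivot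
    · rw [if_pos h]; rw [ih]; simp; omega
    · rw [if_neg h]; rw [ih]; simp; omega

theorem pvPartition_len (array : List Int) (pivot : Int) :
    (pvPartition array pivot).1.length + (pvPartition array pivot).2.length
      = ((array.length : Int) - 1).toNat := by
  unfold pvPartition
  rw [pvPartition_foldl_len]
  simp [PySem.List.length_pyRange_one]

def count_comparisons_final_element (array : List Int) : Int :=
  if (array.length : Int) = 1 ∨ (array.length : Int) = 0 then 0
  else
    (array.length : Int) - 1
      + count_comparisons_final_element (pvPartition array (PySem.List.pyGetD array ((array.length : Int) - 1) 0)).1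
      + count_comparisons_final_element (pvPartition array (PySem.List.pyGetD array ((array.length : Int) - 1) 0)).2
termination_by array.length
decreasing_by
  · have h := pvPartition_len array (PySem.List.pyGetD array ((array.length : Int) - 1) 0)
    omega
  · have h := pvPartition_len array (PySem.List.pyGetD array ((array.length : Int) - 1) 0)
    omega

-- ===== PORT B =====
-- length of the two complementary filters of B's partition (for termination)
theorem ccFilterSplitLen (p : Int) (l : List Int) :
    (l.filter (fun x => decide (x ≤ p))).length
      + (l.filter (fun x => decide (p < x))).length = l.length := by
  induction l with
  | nil => simp
  | cons x xs ih =>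
    by_cases h : x ≤ p
    · have h2 : ¬ (p < x) := by omega
      simp [h, h2]; omega
    · have h2 : p < x := by omega
      simp [h, h2]; omega

-- B's while-loop over the stack; Python pushes/pops at the list END, encoded here with the
-- head of the Lean list as the top of the stack.  xs[:-1] is PySem.List.slice xs none (-1),
-- the two list comprehensions are List.filter, and [::-1] is List.reverse.
def ccStackLoop (stack : List (List Int)) (total : Int) : Int :=
  match stack with
  | [] => total
  | xs :: st =>
    if 1 < (xs.length : Int) then
      ccStackLoop
        ((((PySem.List.slice xs none (some (-1))).filter
              (fun x => x ≤ PySem.List.pyGetD xs (-1) 0)).reverse)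
          :: ((PySem.List.slice xs none (some (-1))).filter
              (fun x => x > PySem.List.pyGetD xs (-1) 0))
          :: st)
        (total + ((xs.length : Int) - 1))
    else ccStackLoop st total
termination_by (stack.map (fun l => 2 * l.length + 1)).sum
decreasing_by
  all_goals simp [PySem.List.slice_to_neg_one]
  all_goals
    (have h1 := ccFilterSplitLen (PySem.List.pyGetD xs (-1) 0) xs.dropLast
     have h3 : xs.dropLast.length = xs.length - 1 := List.length_dropLast
     omega)

def count_comparisons_final_element_alt (array : List Int) : Int :=
  ccStackLoop [array] 0

-- ===== PRECONDITION & SPEC =====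
def Spec_count_comparisons_final_element (array : List Int) (out : Int) : Prop := out = count_comparisons_final_element_alt array
instance (array : List Int) (out : Int) : Decidable (Spec_count_comparisons_final_element array out) := by unfold Spec_count_comparisons_final_element; infer_instance

-- ===== CLAIM =====
def Claim_equal_count_comparisons_final_element : Prop := ∀ (array : List Int), Dom_count_comparisons_final_element array → Spec_count_comparisons_final_element array (count_comparisons_final_element array)

-- ===== LEMMAS AND PROOFS =====

-- A's fold-partition of any index-free list equals the two filters (low side reversed)
theorem foldl_partition_filter (p : Int) (l : List Int) :
    ∀ a b : List Int,
      l.foldl (fun lr x =>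
        if x > p then (lr.1, lr.2 ++ [x]) else (x :: lr.1, lr.2)) (a, b)
      = ((l.filter (fun x => x ≤ p)).reverse ++ a, b ++ l.filter (fun x => x > p)) := by
  induction l with
  | nil => intro a b; simp
  | cons x xs ih =>
    intro a b
    simp only [List.foldl_cons, List.filter_cons]
    by_cases h : x > p
    · rw [if_pos h, ih]
      have h2 : ¬ (x ≤ p) := by omega
      simp [h, h2]
    · rw [if_neg h, ih]
      have h2 : x ≤ p := by omega
      simp [h, h2]

-- A's pvPartition is the filter partition of dropLast
theorem pvPartition_eq_filter (xs : List Int) (p : Int) (h : xs ≠ []) :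
    pvPartition xs p
      = ((xs.dropLast.filter (fun x => x ≤ p)).reverse,
         xs.dropLast.filter (fun x => x > p)) := by
  unfold pvPartition
  have hlen : ((xs.length : Int) - 1) = (xs.dropLast.length : Int) := by
    have hdl : xs.dropLast.length = xs.length - 1 := List.length_dropLast
    have hpos : 0 < xs.length := List.length_pos_of_ne_nil h
    omega
  rw [hlen]
  rw [PySem.List.foldl_congr_mem (g := fun lr i =>
      if PySem.List.pyGetD xs.dropLast i 0 > p then (lr.1, lr.2 ++ [PySem.List.pyGetD xs.dropLast i 0])
      else (PySem.List.pyGetD xs.dropLast i 0 :: lr.1, lr.2))]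
  · rw [PySem.List.foldl_pyRange_zero_pyGetD' xs.dropLast 0
      (fun lr x => if x > p then (lr.1, lr.2 ++ [x]) else (x :: lr.1, lr.2)) ([], [])]
    rw [foldl_partition_filter]
    simp
  · intro acc i hi
    have hb := PySem.List.mem_pyRange_one.mp hi
    have h0 : 0 ≤ i := by omega
    have h1 : i < (xs.dropLast.length : Int) := by omega
    have h1' : i < (xs.length : Int) := by
      have hdl : xs.dropLast.length = xs.length - 1 := List.length_dropLast
      omega
    rw [PySem.List.pyGetD_eq_getElem xs.dropLast 0 h0 h1,
        PySem.List.pyGetD_eq_getElem xs 0 h0 h1']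
    have hget : xs.dropLast[i.toNat]'(by omega) = xs[i.toNat]'(by omega) :=
      List.getElem_dropLast (by omega)
    rw [hget]

-- the two pivot expressions (xs[m-1] in A, xs[-1] in B) agree on nonempty lists
theorem pivot_eq (xs : List Int) (h : xs ≠ []) :
    PySem.List.pyGetD xs ((xs.length : Int) - 1) 0 = PySem.List.pyGetD xs (-1) 0 := by
  have hpos : 0 < xs.length := List.length_pos_of_ne_nil h
  rw [PySem.List.pyGetD_neg_one xs 0 h,
      PySem.List.pyGetD_eq_getElem xs 0 (by omega) (by omega)]
  have : xs.getLast h = xs[xs.length - 1] := (List.getLast_eq_getElem h)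
  rw [this]
  congr 1
  omega

-- the stack loop computes total plus the sum of A's counts of every sublist on the stack
theorem ccStackLoop_eq (stack : List (List Int)) (total : Int) :
    ccStackLoop stack total
      = total + (stack.map count_comparisons_final_element).sum := by
  induction stack, total using ccStackLoop.induct with
  | case1 total => simp [ccStackLoop]
  | case2 total xs st h ih =>
    rw [ccStackLoop, if_pos h, ih]
    simp only [List.map_cons, List.sum_cons]
    have hne : xs ≠ [] := by
      intro hn; subst hn; simp at h
    conv_rhs => rw [count_comparisons_final_element.eq_def]
    have hc : ¬ ((xs.length : Int) = 1 ∨ (xs.length : Int) = 0) := by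
      intro hc; rcases hc with hc | hc <;> omega
    rw [if_neg hc, pvPartition_eq_filter xs _ hne, pivot_eq xs hne]
    simp only [PySem.List.slice_to_neg_one]
    ring
  | case3 total xs st h ih =>
    rw [ccStackLoop, if_neg h, ih]
    simp only [List.map_cons, List.sum_cons]
    rw [count_comparisons_final_element.eq_def]
    have hc : ((xs.length : Int) = 1 ∨ (xs.length : Int) = 0) := by omega
    rw [if_pos hc]
    ring

-- ===== VERDICT =====
theorem count_comparisons_final_element_spec : Claim_equal_count_comparisons_final_element := by
  intro array _
  unfold Spec_count_comparisons_final_element count_comparisons_final_element_alt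
  rw [ccStackLoop_eq]
  simp
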